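-- pv_equiv track=rewrite | github.com/canon64/VoiceDbGui | kks_voices_gui.py | sanitize_segment
-- ===== SOURCE A (Python) =====
-- INVALID_FS_CHARS = '<>:"/\\|?*'
--
-- def sanitize_segment(value):
--     text = "" if value is None else str(value)
--     text = text.strip()
--     if not text:
--         return "unknown"
--     text = text.replace("\r", " ").replace("\n", " ")
--     for ch in INVALID_FS_CHARS:
--         text = text.replace(ch, "_")
--     text = "".join(ch for ch in text if ord(ch) >= 32)
--     text = text.strip(" .")
--     if not text:
--         text = "unknown"
--     return text[:120]
-- ===== SOURCE B (Python) =====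
-- INVALID_FS_CHARS = '<>:"/\\|?*'
--
-- def sanitize_segment(value):
--     text = "" if value is None else str(value)
--     text = text.strip()
--     if not text:
--         return "unknown"
--     out = []
--     for ch in text:
--         if ch in INVALID_FS_CHARS:
--             out.append("_")
--         elif ch in "\r\n":
--             out.append(" ")
--         elif ord(ch) < 32:
--             continue
--         else:
--             out.append(ch)
--     text = "".join(out).strip(" .")
--     if not text:
--         text = "unknown"
--     return text[:120]
-- ===== Notes on version B (the rewrite author's own statement) =====
-- stated objective: simpler
-- what changed: Replaces A's four sequential rewriting passes (two newline replaces, a loop of nine per-character replaces, and a control-character filter) with one single scan that classifies each character once into underscore, space, dropped, or kept.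
import Mathlib
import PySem

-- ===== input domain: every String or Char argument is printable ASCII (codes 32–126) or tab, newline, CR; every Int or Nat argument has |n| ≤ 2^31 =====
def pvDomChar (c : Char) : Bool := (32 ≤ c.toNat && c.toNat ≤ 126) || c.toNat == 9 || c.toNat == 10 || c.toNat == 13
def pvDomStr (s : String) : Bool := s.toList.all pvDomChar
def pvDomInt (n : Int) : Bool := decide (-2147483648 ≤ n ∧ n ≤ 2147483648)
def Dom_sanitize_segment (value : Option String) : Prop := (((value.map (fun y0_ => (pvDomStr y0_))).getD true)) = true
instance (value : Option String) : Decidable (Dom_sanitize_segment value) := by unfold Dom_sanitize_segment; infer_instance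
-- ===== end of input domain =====

-- B collapses A's chained replaces plus a control-character filtering pass into one single classifying scan; objective: simpler.

-- ===== PORT A =====
def pvInvalidFsChars : List Char := ['<', '>', ':', '"', '/', '\\', '|', '?', '*']

def sanitize_segment (value : Option String) : String :=
  let text0 : String := match value with | none => "" | some v => v
  let text1 := PySem.Str.strip text0
  if text1.toList = [] then "unknown" else
  let text2 := PySem.Str.replace (PySem.Str.replace text1 "\r" " ") "\n" " "
  let text3 := pvInvalidFsChars.foldl (fun t ch => PySem.Str.replace t (String.ofList [ch]) "_") text2
  let text4 := PySem.Str.join "" ((text3.toList.filter (fun ch => 32 ≤ ch.toNat)).map (fun c => String.ofList [c]))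
  let text5 := PySem.Str.stripChars text4 " ."
  let text6 := if text5.toList = [] then "unknown" else text5
  PySem.Str.slice text6 none (some 120)

-- ===== PORT B =====
def pvClassify (ch : Char) : List Char :=
  if pvInvalidFsChars.contains ch then ['_']
  else if ['\r', '\n'].contains ch then [' ']
  else if ch.toNat < 32 then []
  else [ch]

def sanitize_segment_alt (value : Option String) : String :=
  let text := PySem.Str.strip (value.getD "")
  if text.toList = [] then "unknown" else
  let out := text.toList.foldl (fun acc ch => acc ++ pvClassify ch) []
  let t1 := PySem.Chars.stripChars out [' ', '.']
  let t2 := if t1 = [] then "unknown".toList else t1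
  String.ofList (PySem.Chars.slice t2 none (some 120))

-- ===== PRECONDITION & SPEC =====
def Spec_sanitize_segment (value : Option String) (out : String) : Prop := out = sanitize_segment_alt value
instance (value : Option String) (out : String) : Decidable (Spec_sanitize_segment value out) := by unfold Spec_sanitize_segment; infer_instance

-- ===== CLAIM (what is proved, stated in full; the proofs are below) =====
def Claim_equal_sanitize_segment : Prop := ∀ (value : Option String), Dom_sanitize_segment value → Spec_sanitize_segment value (sanitize_segment value)

-- ===== LEMMAS AND PROOFS =====

lemma replace_go_single (a b : Char) : ∀ (fuel : Nat) (l acc : List Char), l.length ≤ fuel →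
    PySem.Chars.replace.go [a] [b] fuel l acc = acc.reverse ++ l.map (fun c => if c = a then b else c) := by
  intro fuel
  induction fuel with
  | zero => intro l acc h; cases l with
    | nil => simp [PySem.Chars.replace.go]
    | cons c t => simp at h
  | succ n ih =>
    intro l acc h
    cases l with
    | nil => simp [PySem.Chars.replace.go]
    | cons c t =>
      by_cases hc : c = a
      · subst hc
        have hpre : List.isPrefixOf [c] (c :: t) = true := by simp [List.isPrefixOf]
        simp only [PySem.Chars.replace.go, hpre, if_true]
        rw [show List.drop [c].length (c :: t) = t from rfl,
            show ([b].reverse ++ acc) = b :: acc from rfl]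
        rw [ih t (b :: acc) (by simp at h; omega)]
        simp
      · have hpre : List.isPrefixOf [a] (c :: t) = false := by
          simp [List.isPrefixOf]
          exact fun h' => hc h'.symm
        simp only [PySem.Chars.replace.go, hpre]
        rw [ih t (c :: acc) (by simpa using Nat.le_of_succ_le_succ h)]
        simp [hc]

lemma replace_single (s : List Char) (a b : Char) :
    PySem.Chars.replace s [a] [b] = s.map (fun c => if c = a then b else c) := by
  simp only [PySem.Chars.replace, List.isEmpty]
  exact replace_go_single a b s.length s [] le_rfl

def pvCrlf (c : Char) : Char := if c = '\n' then ' ' else if c = '\r' then ' ' else c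
def pvInval (c : Char) : Char := if c ∈ pvInvalidFsChars then '_' else c

lemma foldl_replace_eq_map (l : List Char) : ∀ (s : List Char),
    l.foldl (fun t ch => PySem.Chars.replace t [ch] ['_']) s
      = s.map (fun c => l.foldl (fun c ch => if c = ch then '_' else c) c) := by
  induction l with
  | nil => intro s; simp
  | cons x xs ih =>
    intro s
    simp only [List.foldl_cons]
    rw [replace_single, ih, List.map_map]
    rfl

lemma inval_foldl (c : Char) :
    pvInvalidFsChars.foldl (fun c ch => if c = ch then '_' else c) c = pvInval c := by
  by_cases h : c ∈ pvInvalidFsChars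
  · simp only [pvInvalidFsChars] at h
    fin_cases h <;> decide
  · have h' : ¬(c = '<' ∨ c = '>' ∨ c = ':' ∨ c = '"' ∨ c = '/' ∨ c = '\\' ∨ c = '|' ∨ c = '?' ∨ c = '*') := by
      simpa [pvInvalidFsChars] using h
    push Not at h'
    obtain ⟨h1, h2, h3, h4, h5, h6, h7, h8, h9⟩ := h'
    simp [pvInval, pvInvalidFsChars, h1, h2, h3, h4, h5, h6, h7, h8, h9]

lemma classify_eq (c : Char) :
    pvClassify c = if 32 ≤ (pvInval (pvCrlf c)).toNat then [pvInval (pvCrlf c)] else [] := by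
  by_cases h : c ∈ pvInvalidFsChars
  · simp only [pvInvalidFsChars] at h
    fin_cases h <;> decide
  · by_cases hr : c = '\r'
    · subst hr; decide
    by_cases hn : c = '\n'
    · subst hn; decide
    have hcon : pvInvalidFsChars.contains c = false := by simpa using h
    have hrn : (['\r', '\n'].contains c) = false := by
      simp
      exact ⟨hr, hn⟩
    have hcrlf : pvCrlf c = c := by simp [pvCrlf, hr, hn]
    have hinv : pvInval c = c := by simp [pvInval, h]
    simp only [pvClassify, hcon, hrn, Bool.false_eq_true, if_false, hcrlf, hinv]
    rcases Nat.lt_or_ge c.toNat 32 with h32 | h32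
    · simp [h32, Nat.not_le.mpr h32]
    · simp [Nat.not_lt.mpr h32, h32]

lemma flatMap_classify (cs : List Char) :
    cs.flatMap pvClassify = ((cs.map pvCrlf).map pvInval).filter (fun ch => 32 ≤ ch.toNat) := by
  induction cs with
  | nil => rfl
  | cons c t ih =>
    simp only [List.flatMap_cons, List.map_cons, List.filter_cons, ih, classify_eq c]
    by_cases h : 32 ≤ (pvInval (pvCrlf c)).toNat <;> simp [h]

lemma foldl_str_replace_toList (l : List Char) : ∀ (s : String),
    (l.foldl (fun t ch => PySem.Str.replace t (String.ofList [ch]) "_") s).toList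
      = l.foldl (fun t ch => PySem.Chars.replace t [ch] ['_']) s.toList := by
  induction l with
  | nil => intro s; rfl
  | cons x xs ih =>
    intro s
    simp only [List.foldl_cons]
    rw [ih]
    congr 1
    rw [PySem.Str.toList_replace]
    simp

-- list-level core: A's four rewriting passes produce exactly B's single classifying scan
lemma passes_eq_scan (s : String) :
    (PySem.Str.join "" ((((pvInvalidFsChars.foldl (fun t ch => PySem.Str.replace t (String.ofList [ch]) "_")
        (PySem.Str.replace (PySem.Str.replace s "\r" " ") "\n" " "))).toList.filter
        (fun ch => 32 ≤ ch.toNat)).map (fun c => String.ofList [c]))).toList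
      = s.toList.foldl (fun acc ch => acc ++ pvClassify ch) [] := by
  have hB : s.toList.foldl (fun acc ch => acc ++ pvClassify ch) [] = s.toList.flatMap pvClassify := by
    simpa using PySem.List.foldl_append_eq_flatMap pvClassify s.toList []
  have hA2 : (PySem.Str.replace (PySem.Str.replace s "\r" " ") "\n" " ").toList
      = s.toList.map pvCrlf := by
    simp only [PySem.Str.toList_replace]
    rw [show ("\r" : String).toList = ['\r'] from rfl, show ("\n" : String).toList = ['\n'] from rfl,
      show (" " : String).toList = [' '] from rfl]
    rw [replace_single, replace_single, List.map_map]
    apply List.map_congr_left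
    intro c _
    simp only [Function.comp, pvCrlf]
    by_cases h1 : c = '\r' <;> by_cases h2 : c = '\n' <;> simp_all
  have hA3 : (pvInvalidFsChars.foldl (fun t ch => PySem.Str.replace t (String.ofList [ch]) "_")
      (PySem.Str.replace (PySem.Str.replace s "\r" " ") "\n" " ")).toList
      = (s.toList.map pvCrlf).map pvInval := by
    rw [foldl_str_replace_toList, foldl_replace_eq_map, hA2]
    apply List.map_congr_left
    intro c _
    exact inval_foldl c
  rw [PySem.Str.toList_join, hA3, hB, flatMap_classify]
  rw [show ("" : String).toList = [] from rfl, List.map_map]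
  have : (String.toList ∘ fun c => String.ofList [c]) = fun c => [c] := by
    funext c
    simp
  rw [this]
  exact PySem.Chars.join_nil_singletons _

theorem sanitize_core (value : Option String) :
    sanitize_segment value = sanitize_segment_alt value := by
  unfold sanitize_segment sanitize_segment_alt
  have hv : (match value with | none => "" | some v => v) = value.getD "" := by
    cases value <;> rfl
  rw [hv]
  by_cases hemp : (PySem.Str.strip (value.getD "")).toList = []
  · simp only [hemp, if_true]
  · simp only [hemp, if_false]
    apply String.toList_inj.mp
    have h5 : (PySem.Str.stripChars (PySem.Str.join ""
        ((((pvInvalidFsChars.foldl (fun t ch => PySem.Str.replace t (String.ofList [ch]) "_")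
        (PySem.Str.replace (PySem.Str.replace (PySem.Str.strip (value.getD "")) "\r" " ") "\n" " "))).toList.filter
        (fun ch => 32 ≤ ch.toNat)).map (fun c => String.ofList [c]))) " .").toList
        = PySem.Chars.stripChars
            ((PySem.Str.strip (value.getD "")).toList.foldl (fun acc ch => acc ++ pvClassify ch) []) [' ', '.'] := by
      rw [PySem.Str.toList_stripChars, passes_eq_scan]
      rfl
    rw [PySem.Str.toList_slice]
    rw [String.toList_ofList]
    rw [apply_ite String.toList]
    rw [h5]

-- ===== VERDICT (by name: the statement is the Claim_ definition above) =====
theorem sanitize_segment_spec : Claim_equal_sanitize_segment := by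
  intro value _
  unfold Spec_sanitize_segment
  exact sanitize_core value
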